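-- pv_equiv track=rewrite | github.com/Levyaton/KAB-Semestralka | ear/VignettCipher.py | getDictionaries
-- ===== SOURCE A (Python) =====
-- def getAlphabetMatrix(alphabet):
--     matrix = {}
--     length = len(alphabet)
--     prev = alphabet[length-1] + alphabet[0:length-1]
--
--     for x in range(0,len(alphabet),1):
--         char = alphabet[x]
--         current =  prev[1:] + prev[0]
--         matrix[char] = current
--         prev = current
--     return matrix
--
-- def getDictionaries(password, alphabet):
--     dictionaries = []
--     matrix = getAlphabetMatrix(alphabet)
--     primeAlphabet = matrix["a"]
--     for char in password:
--         shiftedAlphabet = matrix[char]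
--         dictionary = {}
--         for x in range(0,len(primeAlphabet),1):
--             dictionary[shiftedAlphabet[x]]=primeAlphabet[x]
--         dictionaries.append(dictionary)
--     return dictionaries
-- ===== SOURCE B (Python) =====
-- def getDictionaries(password, alphabet):
--     pos = {c: i for i, c in enumerate(alphabet)}
--     n = len(alphabet)
--     ia = pos["a"]
--     dictionaries = []
--     for ch in password:
--         i = pos[ch]
--         dictionary = {}
--         for x in range(n):
--             dictionary[alphabet[(x + i) % n]] = alphabet[(x + ia) % n]
--         dictionaries.append(dictionary)
--     return dictionaries
-- ===== Notes on version B (the rewrite author's own statement) =====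
-- stated objective: alternative
-- what changed: Replaces the O(n^2) rotation-tableau (a dict of n rotated alphabet strings built by repeated string rotation) with a position-index dict built once via enumerate plus direct modular-arithmetic indexing alphabet[(x+i)%n].
import Mathlib
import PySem

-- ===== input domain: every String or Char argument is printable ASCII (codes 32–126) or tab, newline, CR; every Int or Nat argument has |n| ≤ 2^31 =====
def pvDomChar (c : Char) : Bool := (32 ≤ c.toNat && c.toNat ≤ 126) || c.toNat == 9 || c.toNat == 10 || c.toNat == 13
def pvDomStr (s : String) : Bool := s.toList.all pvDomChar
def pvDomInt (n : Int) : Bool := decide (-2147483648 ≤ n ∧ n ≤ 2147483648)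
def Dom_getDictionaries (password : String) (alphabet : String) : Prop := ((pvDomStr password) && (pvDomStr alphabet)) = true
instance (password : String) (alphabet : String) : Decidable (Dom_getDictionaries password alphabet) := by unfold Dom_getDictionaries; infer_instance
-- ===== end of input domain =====

-- B replaces A's O(n^2) rotation-tableau dict with a position-index dict plus modular indexing; equal output on Pre_.

-- ===== PORT A =====
-- helper: Python getAlphabetMatrix(alphabet) on the char list
def getAlphabetMatrix (alphabet : List Char) : PySem.Dict Char (List Char) :=
  let length := alphabet.length
  let prev : List Char :=
    (PySem.List.pyGet? alphabet ((length : Int) - 1)).toList ++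
      PySem.List.slice alphabet (some 0) (some ((length : Int) - 1))
  ((PySem.List.pyRange 0 (length : Int) 1).foldl
    (fun (st : PySem.Dict Char (List Char) × List Char) x =>
      let char := PySem.List.pyGetD alphabet x ' '
      let current := PySem.List.slice st.2 (some 1) none ++ (PySem.List.pyGet? st.2 0).toList
      (st.1.insert char current, current))
    ((PySem.Dict.empty : PySem.Dict Char (List Char)), prev)).1

def getDictionaries (password : String) (alphabet : String) : List (List (String × String)) :=
  let matrix := getAlphabetMatrix alphabet.toList
  let primeAlphabet := (matrix.get? 'a').getD []     -- under Pre_ the lookup succeeds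
  password.toList.map (fun char =>
    let shiftedAlphabet := (matrix.get? char).getD []
    ((PySem.List.pyRange 0 (primeAlphabet.length : Int) 1).foldl
      (fun (d : PySem.Dict Char Char) x =>
        d.insert (PySem.List.pyGetD shiftedAlphabet x ' ') (PySem.List.pyGetD primeAlphabet x ' '))
      PySem.Dict.empty).items.map (fun p => (String.ofList [p.1], String.ofList [p.2])))

-- ===== PORT B =====
def getDictionaries_alt (password : String) (alphabet : String) : List (List (String × String)) :=
  let al := alphabet.toList
  let pos := (PySem.List.enumerate al).foldl
    (fun (d : PySem.Dict Char Int) p => d.insert p.2 p.1) PySem.Dict.empty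
  let n : Int := al.length
  let ia := (pos.get? 'a').getD 0                    -- under Pre_ the lookup succeeds
  password.toList.map (fun ch =>
    let i := (pos.get? ch).getD 0
    ((PySem.List.pyRange 0 n 1).foldl
      (fun (d : PySem.Dict Char Char) x =>
        d.insert (PySem.List.pyGetD al (PySem.Int.mod (x + i) n) ' ')
                 (PySem.List.pyGetD al (PySem.Int.mod (x + ia) n) ' '))
      PySem.Dict.empty).items.map (fun p => (String.ofList [p.1], String.ofList [p.2])))

-- ===== PRECONDITION & SPEC =====
-- Pre_ excludes exactly the inputs where A raises: empty alphabet (IndexError), 'a' not in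
-- alphabet or a password char not in alphabet (KeyError).
def Pre_getDictionaries (password : String) (alphabet : String) : Prop :=
  alphabet.toList ≠ [] ∧ 'a' ∈ alphabet.toList ∧ password.toList.all (fun c => c ∈ alphabet.toList) = true
instance (password : String) (alphabet : String) : Decidable (Pre_getDictionaries password alphabet) := by
  unfold Pre_getDictionaries; infer_instance
def pvWitness_getDictionaries : String × String := ("ba", "abc")

def Spec_getDictionaries (password : String) (alphabet : String) (out : List (List (String × String))) : Prop := out = getDictionaries_alt password alphabet
instance (password : String) (alphabet : String) (out : List (List (String × String))) : Decidable (Spec_getDictionaries password alphabet out) := by unfold Spec_getDictionaries; infer_instance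


-- ===== CLAIM (what is proved, stated in full; the proofs are below) =====
def Claim_equal_getDictionaries : Prop := ∀ (password : String) (alphabet : String), Dom_getDictionaries password alphabet → Pre_getDictionaries password alphabet → Spec_getDictionaries password alphabet (getDictionaries password alphabet)

-- ===== LEMMAS AND PROOFS =====

def rotL (al : List Char) (k : Nat) : List Char := al.drop k ++ al.take k

theorem rotL_length (al : List Char) (k : Nat) : (rotL al k).length = al.length := by
  simp [rotL]; omega

theorem rotL_step (al : List Char) (p : Nat) (hp : p < al.length) :
    PySem.List.slice (rotL al p) (some 1) none ++ (PySem.List.pyGet? (rotL al p) 0).toList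
      = rotL al ((p + 1) % al.length) := by
  have hd : al.drop p = al[p] :: al.drop (p+1) := List.drop_eq_getElem_cons hp
  have h0 : (PySem.List.pyGet? (rotL al p) 0) = some al[p] := by
    rw [show (0:Int) = ((0:Nat):Int) from rfl, PySem.List.pyGet?_natCast, rotL, hd]
    simp only [List.cons_append, List.getElem?_cons_zero]
  rw [PySem.List.slice_from_one, h0]
  simp only [rotL, hd, List.cons_append, List.tail_cons, Option.toList_some]
  have htk : al.take p ++ [al[p]] = al.take (p+1) := by rw [List.take_add_one]; simp [List.getElem?_eq_getElem hp]
  by_cases hend : p + 1 = al.length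
  · rw [hend, Nat.mod_self, List.drop_zero, List.take_zero, List.append_nil,
      List.append_assoc, htk, hend]
    simp
  · rw [Nat.mod_eq_of_lt (by omega), List.append_assoc, htk]

theorem matrix_fold_eq (al : List Char) :
    ∀ (fuel m : Nat), al.length - m = fuel → m ≤ al.length →
      ∀ (d : PySem.Dict Char (List Char)) (p : Nat), p < al.length →
      (p + 1) % al.length = m % al.length →
      ((PySem.List.pyRange (m : Int) (al.length : Int) 1).foldl
        (fun (st : PySem.Dict Char (List Char) × List Char) x =>
          (st.1.insert (PySem.List.pyGetD al x ' ')
              (PySem.List.slice st.2 (some 1) none ++ (PySem.List.pyGet? st.2 0).toList),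
            PySem.List.slice st.2 (some 1) none ++ (PySem.List.pyGet? st.2 0).toList))
        (d, rotL al p)).1
      = (PySem.List.pyRange (m : Int) (al.length : Int) 1).foldl
          (fun d x => d.insert (PySem.List.pyGetD al x ' ') (rotL al x.toNat)) d := by
  intro fuel
  induction fuel with
  | zero =>
    intro m hf hm d p hp hpm
    have hme : (al.length : Int) ≤ (m : Int) := by exact_mod_cast (by omega : al.length ≤ m)
    rw [PySem.List.pyRange_one_eq_nil hme]; rfl
  | succ f ih =>
    intro m hf hm d p hp hpm
    have hmlt : m < al.length := by omega
    rw [PySem.List.pyRange_one_cons (by exact_mod_cast hmlt : (m:Int) < (al.length:Int))]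
    simp only [List.foldl_cons]
    have hcur : PySem.List.slice (rotL al p) (some 1) none ++ (PySem.List.pyGet? (rotL al p) 0).toList
        = rotL al m := by
      rw [rotL_step al p hp, hpm, Nat.mod_eq_of_lt hmlt]
    have hcast : ((m:Int) + 1) = (((m+1 : Nat)):Int) := by push_cast; ring
    rw [show ((m:Int).toNat) = m from Int.toNat_natCast m] at *
    simp only [hcur]
    rw [hcast]
    have := ih (m+1) (by omega) (by omega) (d.insert (PySem.List.pyGetD al (m:Int) ' ') (rotL al m)) m hmlt rfl
    convert this using 3

theorem link_fold (al : List Char) :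
    ∀ (xs : List Int) (dA : PySem.Dict Char (List Char)) (dB : PySem.Dict Char Int),
      (∀ c, dA.get? c = (dB.get? c).map (fun i => rotL al i.toNat)) →
      ∀ c, (xs.foldl (fun d x => d.insert (PySem.List.pyGetD al x ' ') (rotL al x.toNat)) dA).get? c
        = ((xs.foldl (fun d x => d.insert (PySem.List.pyGetD al x ' ') x) dB).get? c).map
            (fun i => rotL al i.toNat) := by
  intro xs
  induction xs with
  | nil => intro dA dB h c; exact h c
  | cons x t ih =>
    intro dA dB h c
    simp only [List.foldl_cons]
    apply ih
    intro c'
    rw [PySem.Dict.get?_insert, PySem.Dict.get?_insert]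
    split_ifs with hc
    · rfl
    · exact h c'

theorem pos_fold_values (al : List Char) :
    ∀ (xs : List Int) (dB : PySem.Dict Char Int) (c : Char) (i : Int),
      (xs.foldl (fun d x => d.insert (PySem.List.pyGetD al x ' ') x) dB).get? c = some i →
      i ∈ xs ∨ dB.get? c = some i := by
  intro xs
  induction xs with
  | nil => intro dB c i h; exact Or.inr h
  | cons x t ih =>
    intro dB c i h
    rcases ih _ c i h with hi | hd
    · exact Or.inl (List.mem_cons_of_mem _ hi)
    · rw [PySem.Dict.get?_insert] at hd
      split_ifs at hd with hc
      · exact Or.inl (by simp [Option.some_inj.mp hd])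
      · exact Or.inr hd

theorem pos_fold_some (al : List Char) :
    ∀ (xs : List Int) (dB : PySem.Dict Char Int) (c : Char),
      (∃ x ∈ xs, PySem.List.pyGetD al x ' ' = c) ∨ (dB.get? c).isSome →
      ((xs.foldl (fun d x => d.insert (PySem.List.pyGetD al x ' ') x) dB).get? c).isSome := by
  intro xs
  induction xs with
  | nil =>
    intro dB c h
    rcases h with ⟨x, hx, _⟩ | h
    · simp at hx
    · exact h
  | cons x t ih =>
    intro dB c h
    simp only [List.foldl_cons]
    apply ih
    rcases h with ⟨y, hy, hyc⟩ | h
    · rcases List.mem_cons.mp hy with rfl | hyt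
      · right; rw [PySem.Dict.get?_insert]; simp [hyc]
      · exact Or.inl ⟨y, hyt, hyc⟩
    · right
      rw [PySem.Dict.get?_insert]
      split_ifs with hc
      · simp
      · exact h

theorem rotL_index (al : List Char) (j x : Int) (h0 : 0 ≤ j) (hj : j < al.length)
    (hx0 : 0 ≤ x) (hx : x < al.length) :
    PySem.List.pyGetD (rotL al j.toNat) x ' '
      = PySem.List.pyGetD al (PySem.Int.mod (x + j) (al.length : Int)) ' ' := by
  have hn : (0:Int) < al.length := by omega
  rw [PySem.Int.mod_eq_emod_of_pos hn]
  have hmod0 : 0 ≤ (x + j) % (al.length:Int) := Int.emod_nonneg _ (by omega)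
  have hmodlt : (x + j) % (al.length:Int) < al.length := Int.emod_lt_of_pos _ hn
  rw [PySem.List.pyGetD_eq_getElem _ _ hx0 (by rw [rotL_length]; exact hx),
      PySem.List.pyGetD_eq_getElem _ _ hmod0 hmodlt]
  have hmodval : ((x + j) % (al.length:Int)).toNat
      = (x.toNat + j.toNat) % al.length := by
    have : (x + j) % (al.length:Int) = ((x.toNat + j.toNat) % al.length : Nat) := by
      push_cast; rw [Int.toNat_of_nonneg hx0, Int.toNat_of_nonneg h0]
    omega
  rw [getElem_congr rfl hmodval (by omega : ((x + j) % (al.length:Int)).toNat < al.length)]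
  unfold rotL
  rcases Nat.lt_or_ge (x.toNat + j.toNat) al.length with hlt | hge
  · rw [getElem_congr rfl (Nat.mod_eq_of_lt hlt) (by omega : (x.toNat + j.toNat) % al.length < al.length)]
    rw [List.getElem_append_left (by simp; omega)]
    rw [List.getElem_drop]
    exact getElem_congr rfl (by omega) (by omega)
  · have hmod : (x.toNat + j.toNat) % al.length = x.toNat + j.toNat - al.length := by
      rw [Nat.mod_eq_sub_mod hge, Nat.mod_eq_of_lt (by omega)]
    rw [getElem_congr rfl hmod (by omega : (x.toNat + j.toNat) % al.length < al.length)]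
    rw [List.getElem_append_right (by simp; omega)]
    rw [List.getElem_take]
    exact getElem_congr rfl (by simp; omega) (by omega)


-- ===== VERDICT (by name: the statement is the Claim_ definition above) =====
theorem getDictionaries_spec : Claim_equal_getDictionaries := by
  intro password alphabet _ hpre
  obtain ⟨hne, ha, hpwb⟩ := hpre
  have hpw : ∀ c ∈ password.toList, c ∈ alphabet.toList := by simpa using hpwb
  unfold Spec_getDictionaries getDictionaries getDictionaries_alt
  set al := alphabet.toList with hal
  have hn1 : 1 ≤ al.length := List.length_pos_of_ne_nil hne
  -- A's matrix equals the direct indexed fold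
  have hprev : (PySem.List.pyGet? al ((al.length : Int) - 1)).toList ++
      PySem.List.slice al (some 0) (some ((al.length : Int) - 1)) = rotL al (al.length - 1) := by
    have hc : ((al.length : Int) - 1) = ((al.length - 1 : Nat) : Int) := by omega
    have hlt : al.length - 1 < al.length := by omega
    rw [hc, PySem.List.pyGet?_natCast, PySem.List.slice_zero_start, PySem.List.slice_to_natCast,
        List.getElem?_eq_getElem hlt]
    unfold rotL
    rw [List.drop_eq_getElem_cons hlt]
    have : al.length - 1 + 1 = al.length := by omega
    rw [this, List.drop_length]
    simp
  have hmat : ∀ c, (getAlphabetMatrix al).get? c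
      = ((PySem.List.pyRange 0 (al.length : Int) 1).foldl
          (fun (d : PySem.Dict Char (List Char)) x => d.insert (PySem.List.pyGetD al x ' ') (rotL al x.toNat))
          PySem.Dict.empty).get? c := by
    intro c
    unfold getAlphabetMatrix
    simp only [hprev]
    have H := matrix_fold_eq al al.length 0 rfl (by omega) PySem.Dict.empty (al.length - 1)
      (by omega) (by
        have h1 : al.length - 1 + 1 = al.length := by omega
        rw [h1, Nat.mod_self, Nat.zero_mod])
    simp only [Nat.cast_zero] at H
    rw [H]
  -- B's pos fold as an indexed fold
  have hpos : ((PySem.List.enumerate al).foldl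
        (fun (d : PySem.Dict Char Int) p => d.insert p.2 p.1) PySem.Dict.empty)
      = (PySem.List.pyRange 0 (al.length : Int) 1).foldl
          (fun d x => d.insert (PySem.List.pyGetD al x ' ') x)
          (PySem.Dict.empty : PySem.Dict Char Int) := by
    rw [PySem.List.enumerate_eq_map_pyRange al ' ', List.foldl_map]
    simp [PySem.List.len_eq]
  -- pointwise relation matrix ↔ pos
  have hrel : ∀ c, (getAlphabetMatrix al).get? c
      = (((PySem.List.enumerate al).foldl
          (fun (d : PySem.Dict Char Int) p => d.insert p.2 p.1) PySem.Dict.empty).get? c).map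
            (fun i => rotL al i.toNat) := by
    intro c
    rw [hmat c, hpos]
    exact link_fold al _ _ _ (fun c' => rfl) c
  -- any alphabet char has a bounded position
  have hidx : ∀ c, c ∈ al → ∃ i : Int, ((PySem.List.enumerate al).foldl
        (fun (d : PySem.Dict Char Int) p => d.insert p.2 p.1) PySem.Dict.empty).get? c = some i ∧
        0 ≤ i ∧ i < al.length := by
    intro c hc
    obtain ⟨k, hk, hck⟩ := List.getElem_of_mem hc
    have hmem : ((k : Int)) ∈ PySem.List.pyRange 0 (al.length : Int) 1 := by
      rw [PySem.List.mem_pyRange_one]; omega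
    have hkey : PySem.List.pyGetD al ((k : Int)) ' ' = c := by
      rw [PySem.List.pyGetD_eq_getElem al ' ' (by omega) (by exact_mod_cast hk)]
      simpa using hck
    have hsome := pos_fold_some al (PySem.List.pyRange 0 (al.length : Int) 1)
      PySem.Dict.empty c (Or.inl ⟨(k : Int), hmem, hkey⟩)
    rw [hpos]
    obtain ⟨i, hi⟩ := Option.isSome_iff_exists.mp hsome
    refine ⟨i, hi, ?_⟩
    rcases pos_fold_values al _ _ _ _ hi with hmem' | hemp
    · rw [PySem.List.mem_pyRange_one] at hmem'; exact hmem'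
    · exact absurd hemp (by simp [PySem.Dict.empty, PySem.Dict.get?])
  obtain ⟨ia, hia, hia0, hialt⟩ := hidx 'a' ha
  apply List.map_congr_left
  intro ch hch
  obtain ⟨i, hi, hi0, hilt⟩ := hidx ch (hpw ch hch)
  simp only [hrel, hi, hia, Option.map_some, Option.getD_some, rotL_length]
  rw [PySem.List.foldl_congr_mem (PySem.List.pyRange 0 (al.length : Int) 1)
      (fun (d : PySem.Dict Char Char) x => d.insert (PySem.List.pyGetD (rotL al i.toNat) x ' ') (PySem.List.pyGetD (rotL al ia.toNat) x ' '))
      (fun (d : PySem.Dict Char Char) x => d.insert (PySem.List.pyGetD al (PySem.Int.mod (x + i) (al.length : Int)) ' ') (PySem.List.pyGetD al (PySem.Int.mod (x + ia) (al.length : Int)) ' '))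
      PySem.Dict.empty ?_]
  intro acc x hx
  rw [PySem.List.mem_pyRange_one] at hx
  dsimp only
  rw [rotL_index al i x hi0 hilt hx.1 hx.2, rotL_index al ia x hia0 hialt hx.1 hx.2]
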